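/- GENERATED by mk_final_copies.py from the proof of the farm's unit `decode_residue.6b` (farm:decode_residue.6b.1: Proof.lean) as the
   re-elaboration sweep compiled it — do not edit. -/
import Vorbis.Spec.Units.decode_residue_6b
import Vorbis.Spec.Worked.decode_residue_6b_Lemmas

open X86 X86.User Asan Vorbis Vorbis.Spec Vorbis.Spec.DecodeResidue

/-- Unit `decode_residue.6b`: the body proper of the i-loop 2229 (0x10f579 … 0x10f634 + 0x10f4ed … 0x10f54d + 0x10f639 … 0x10f640), as
the three walks of Lemmas.lean composed by `ReachVia.trans`: the front (`seg6b_front`: `z`, the class number, the book `b`; seven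
check sites), the sign test of `b` with the `b < 0` arm (`seg6b_neg`: `cdq ; idiv ch`, CI, the latch), and the call arm
(`seg6b_call`: one check site, codebook_decode_deinterleave_repeat, result 1: the latch; result 0: `done:`). -/
theorem Vorbis.Spec.Worked.decode_residue_6b_ok : Vorbis.Spec.decode_residue_6b.Statement := by
  intro Lay hLay μ hμ u₀ hcode h_load8 h_deint h_load4 h_load1 h_load2
  intro g hent pass cs i pcount v hat
  -- the callee's contract for the live lists, the block predicate and the input length inside the function
  have h_deint' := h_deint g.others' g.frames' g.Blk g.len
  -- 0x10f579 … 0x10f60e (C 2230–2236): the front of the body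
  refine (Vorbis.Spec.decode_residue_6b.seg6b_front hLay hμ hcode h_load8 h_load4 h_load1 h_load2 hent pass cs i pcount v
    hat).trans ?_
  intro v1 h1
  obtain ⟨b, hb1⟩ := h1
  -- 0x10f60e (C 2237): the sign test of `b`; `b < 0`: 0x10f619 … 0x10f634 and the latch 0x10f549 / 0x10f54d
  refine (Vorbis.Spec.decode_residue_6b.seg6b_neg hLay hμ hcode hent pass cs i pcount b v1 hb1).trans ?_
  intro v2 h2
  rcases h2 with hinner | ⟨hb15, harm⟩
  · exact ReachVia.done (Or.inl hinner)
  · -- 0x10f4ed … 0x10f54d, 0x10f639 … 0x10f640 (C 2238–2239): the call arm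
    exact Vorbis.Spec.decode_residue_6b.seg6b_call hLay hμ hcode h_load8 h_deint' hent pass cs i pcount b v2 hb15 harm
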